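-- pv_equiv track=rewrite | github.com/WillKeWang/Wearable_Mental_Causal | plot_causal_diagram_2.py | find_descendants
-- ===== SOURCE A (Python) =====
-- def find_descendants(source_nodes, edges):
--     """Find all descendants (nodes reachable from source) in directed graph."""
--     descendants = set(source_nodes)
--     changed = True
--
--     while changed:
--         changed = False
--         for (source, target) in edges.keys():
--             if source in descendants and target not in descendants:
--                 descendants.add(target)
--                 changed = True
--
--     return descendants
-- ===== SOURCE B (Python) =====
-- def find_descendants(source_nodes, edges):
--     """Find all descendants (nodes reachable from source) in directed graph.
--
--     BFS over an adjacency index: build source -> [targets] once, then expand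
--     frontier by frontier; each edge is reached through the index instead of
--     being rescanned on every fixed-point sweep."""
--     adj = {}
--     for (source, target) in edges.keys():
--         adj.setdefault(source, []).append(target)
--     seen = set(source_nodes)
--     frontier = list(source_nodes)
--     while frontier:
--         next_frontier = []
--         for u in frontier:
--             for v in adj.get(u, []):
--                 if v not in seen:
--                     seen.add(v)
--                     next_frontier.append(v)
--         frontier = next_frontier
--     return seen
-- ===== Notes on version B (the rewrite author's own statement) =====
-- stated objective: alternative
-- what changed: B replaces A's repeated whole-edge-set fixed-point sweeps with a breadth-first search: it builds a source->targets adjacency index once, then expands a frontier level by level, so membership of the edge set is traversed through the index rather than rescanned on every sweep; measured running times are comparable on the generated inputs.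
import Mathlib
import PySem

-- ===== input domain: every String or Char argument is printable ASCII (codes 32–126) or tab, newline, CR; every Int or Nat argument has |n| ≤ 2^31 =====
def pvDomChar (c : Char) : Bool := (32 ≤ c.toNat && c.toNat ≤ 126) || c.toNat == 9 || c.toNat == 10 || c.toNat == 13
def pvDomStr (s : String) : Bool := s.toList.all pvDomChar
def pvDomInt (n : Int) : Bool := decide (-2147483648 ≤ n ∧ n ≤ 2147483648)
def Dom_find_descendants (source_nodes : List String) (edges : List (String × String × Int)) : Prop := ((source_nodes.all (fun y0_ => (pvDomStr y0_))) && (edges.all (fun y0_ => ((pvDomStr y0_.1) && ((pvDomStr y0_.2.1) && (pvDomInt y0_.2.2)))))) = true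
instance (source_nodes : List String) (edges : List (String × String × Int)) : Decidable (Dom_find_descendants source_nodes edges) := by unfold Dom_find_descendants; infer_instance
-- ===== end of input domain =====

-- B replaces A's repeated whole-edge-set fixed-point sweeps with a BFS over an
-- adjacency index built once (objective: alternative algorithm). Both Pythons RETURN
-- A SET, whose iteration order is not modelled; each port therefore returns the
-- canonical sorted-list representative of the set its loop builds.

-- ===== PORT A =====
-- body of 'for (source, target) in edges.keys()': state = (descendants, changed)
def stepA (st : List String × Bool) (e : String × String × Int) : List String × Bool :=
  if PySem.Set.contains st.1 e.1 && !(PySem.Set.contains st.1 e.2.1) then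
    (PySem.Set.add st.1 e.2.1, true)
  else st

-- one full pass of the 'for' loop, with changed reset to False first
def passA (edges : List (String × String × Int)) (d : List String) : List String × Bool :=
  edges.foldl stepA (d, false)

-- the 'while changed' loop; fuel (edges.length + 1 at the call site) only makes it
-- total: every pass that sets changed adds a node, at most edges.length times
def loopA (edges : List (String × String × Int)) : Nat → List String → List String
  | 0, d => d
  | fuel+1, d =>
      let r := passA edges d
      if r.2 then loopA edges fuel r.1 else r.1

def find_descendants (source_nodes : List String) (edges : List (String × String × Int)) : List String :=
  PySem.List.sorted (loopA edges (edges.length + 1) (PySem.Set.ofList source_nodes)) (fun x => x) false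

-- ===== PORT B =====
-- 'adj = {}; for (source, target) in edges.keys(): adj.setdefault(source, []).append(target)'
def buildAdj (edges : List (String × String × Int)) : PySem.Dict String (List String) :=
  edges.foldl (fun d e => d.modify e.1 [] (· ++ [e.2.1])) PySem.Dict.empty

-- body of 'for v in adj.get(u, [])': state = (seen, next_frontier)
def stepV (st : List String × List String) (v : String) : List String × List String :=
  if PySem.Set.contains st.1 v then st else (PySem.Set.add st.1 v, st.2 ++ [v])

-- body of 'for u in frontier'
def stepU (adj : PySem.Dict String (List String)) (st : List String × List String) (u : String) :
    List String × List String :=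
  (adj.getD u []).foldl stepV st

-- one round of the while-loop: process the whole frontier, next_frontier starts []
def roundB (adj : PySem.Dict String (List String)) (frontier : List String) (seen : List String) :
    List String × List String :=
  frontier.foldl (stepU adj) (seen, [])

-- 'while frontier:'; fuel (edges.length + 2 at the call site) only makes it total:
-- every round that yields a nonempty next frontier adds a new edge target to seen
def loopB (adj : PySem.Dict String (List String)) : Nat → List String → List String → List String
  | 0, seen, _ => seen
  | _+1, seen, [] => seen
  | fuel+1, seen, u :: fr =>
      let r := roundB adj (u :: fr) seen
      loopB adj fuel r.1 r.2

def find_descendants_alt (source_nodes : List String) (edges : List (String × String × Int)) : List String :=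
  PySem.List.sorted
    (loopB (buildAdj edges) (edges.length + 2) (PySem.Set.ofList source_nodes) source_nodes)
    (fun x => x) false

-- ===== PRECONDITION & SPEC =====
def Spec_find_descendants (source_nodes : List String) (edges : List (String × String × Int)) (out : List String) : Prop := out = find_descendants_alt source_nodes edges
instance (source_nodes : List String) (edges : List (String × String × Int)) (out : List String) : Decidable (Spec_find_descendants source_nodes edges out) := by unfold Spec_find_descendants; infer_instance

-- ===== CLAIM (what is proved, stated in full; the proofs are below) =====
def Claim_equal_find_descendants : Prop := ∀ (source_nodes : List String) (edges : List (String × String × Int)), Dom_find_descendants source_nodes edges → Spec_find_descendants source_nodes edges (find_descendants source_nodes edges)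

-- ===== LEMMAS AND PROOFS =====

-- reachability from the sources along the edges: the set both programs compute
inductive Reach (src : List String) (edges : List (String × String × Int)) : String → Prop
  | source {x : String} : x ∈ src → Reach src edges x
  | step {s t : String} {w : Int} : Reach src edges s → (s, t, w) ∈ edges → Reach src edges t

theorem mem_add_iff {d : List String} {x y : String} :
    y ∈ PySem.Set.add d x ↔ y ∈ d ∨ y = x := PySem.Set.mem_add d x y

theorem mem_contains {d : List String} {x : String} :
    PySem.Set.contains d x = true ↔ x ∈ d := PySem.Set.contains_iff d x

-- ---------- A side ----------

theorem foldA_mem_mono (l : List (String × String × Int)) (d : List String) (ch : Bool)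
    (x : String) (h : x ∈ d) : x ∈ (l.foldl stepA (d, ch)).1 := by
  induction l generalizing d ch with
  | nil => exact h
  | cons e l ih =>
    simp only [List.foldl_cons, stepA]
    split
    · exact ih _ _ (mem_add_iff.mpr (Or.inl h))
    · exact ih _ _ h

theorem foldA_sound (src : List String) (edges l : List (String × String × Int))
    (hsub : ∀ e ∈ l, e ∈ edges) :
    ∀ (d : List String) (ch : Bool), (∀ x ∈ d, Reach src edges x) →
      ∀ x ∈ (l.foldl stepA (d, ch)).1, Reach src edges x := by
  induction l with
  | nil => intro d ch hd x hx; exact hd x hx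
  | cons e l ih =>
    intro d ch hd x hx
    have he : e ∈ edges := hsub e (List.mem_cons_self)
    have hsub' : ∀ e' ∈ l, e' ∈ edges := fun e' h' => hsub e' (List.mem_cons_of_mem _ h')
    simp only [List.foldl_cons, stepA] at hx
    split at hx
    · rename_i hc
      refine ih hsub' _ _ ?_ x hx
      intro y hy
      rcases mem_add_iff.mp hy with hy | rfl
      · exact hd y hy
      · have hs : e.1 ∈ d := mem_contains.mp ((Bool.and_eq_true _ _).mp hc).1
        exact Reach.step (hd e.1 hs) (show (e.1, e.2.1, e.2.2) ∈ edges by simpa using he)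
    · exact ih hsub' _ _ hd x hx

theorem foldA_flag_true (l : List (String × String × Int)) (d : List String) :
    (l.foldl stepA (d, true)).2 = true := by
  induction l generalizing d with
  | nil => rfl
  | cons e l ih =>
    simp only [List.foldl_cons, stepA]
    split
    · exact ih _
    · exact ih d

theorem foldA_unchanged (l : List (String × String × Int)) (d : List String)
    (h : (l.foldl stepA (d, false)).2 = false) :
    (l.foldl stepA (d, false)).1 = d ∧ ∀ e ∈ l, e.1 ∈ d → e.2.1 ∈ d := by
  induction l with
  | nil => exact ⟨rfl, by simp⟩
  | cons e l ih =>
    by_cases hc : (PySem.Set.contains d e.1 && !PySem.Set.contains d e.2.1) = true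
    · exfalso
      simp only [List.foldl_cons, stepA, hc, if_true] at h
      rw [foldA_flag_true] at h
      exact Bool.true_eq_false.mp h
    · have hc' : (PySem.Set.contains d e.1 && !PySem.Set.contains d e.2.1) = false :=
        Bool.eq_false_iff.mpr hc
      simp only [List.foldl_cons, stepA, hc', Bool.false_eq_true, if_false] at h ⊢
      rcases ih h with ⟨h1, h2⟩
      refine ⟨h1, ?_⟩
      intro e' he' hs
      rcases List.mem_cons.mp he' with rfl | he'
      · by_contra ht
        have : PySem.Set.contains d e'.1 = true := mem_contains.mpr hs
        have : PySem.Set.contains d e'.2.1 = false := by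
          cases hct : PySem.Set.contains d e'.2.1 with
          | true => exact absurd (mem_contains.mp hct) ht
          | false => rfl
        simp_all
      · exact h2 e' he' hs

theorem foldA_nodup (l : List (String × String × Int)) (d : List String) (ch : Bool)
    (h : d.Nodup) : (l.foldl stepA (d, ch)).1.Nodup := by
  induction l generalizing d ch with
  | nil => exact h
  | cons e l ih =>
    simp only [List.foldl_cons, stepA]
    split
    · exact ih _ _ (PySem.Set.nodup_add _ _ h)
    · exact ih _ _ h

-- measure: edge targets not yet in d
def msr (edges : List (String × String × Int)) (d : List String) : Nat :=
  (edges.map (fun e => e.2.1)).countP (fun t => !(PySem.Set.contains d t))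

theorem msr_le (edges : List (String × String × Int)) (d : List String) :
    msr edges d ≤ edges.length := by
  simpa [msr] using List.countP_le_length (l := edges.map (fun e => e.2.1))
    (p := fun t => !(PySem.Set.contains d t))

theorem countP_strict {l : List String} {p q : String → Bool}
    (hmono : ∀ x ∈ l, q x = true → p x = true)
    (hx : ∃ x ∈ l, p x = true ∧ q x = false) :
    l.countP q < l.countP p := by
  induction l with
  | nil => rcases hx with ⟨x, hx, _⟩; simp at hx
  | cons a l ih =>
    rcases hx with ⟨x, hxl, hp, hq⟩
    have hmono' : ∀ y ∈ l, q y = true → p y = true :=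
      fun y hy => hmono y (List.mem_cons_of_mem _ hy)
    rcases List.mem_cons.1 hxl with rfl | hxl
    · have hle : l.countP q ≤ l.countP p := List.countP_mono_left hmono'
      simp only [List.countP_cons, hp, hq]
      simp only [Bool.false_eq_true, if_false, if_true]
      omega
    · have hlt := ih hmono' ⟨x, hxl, hp, hq⟩
      simp only [List.countP_cons]
      have : (if q a = true then 1 else 0) ≤ (if p a = true then 1 else 0) := by
        by_cases hqa : q a = true
        · simp [hqa, hmono a (List.mem_cons_self) hqa]
        · simp [hqa]
      omega

-- a pass that reports changed added some target that was not yet in d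
theorem foldA_true (es : List (String × String × Int)) :
    ∀ d : List String, (es.foldl stepA (d, false)).2 = true →
    ∃ t, t ∈ es.map (fun e => e.2.1) ∧ PySem.Set.contains d t = false ∧
      t ∈ (es.foldl stepA (d, false)).1 := by
  induction es with
  | nil => intro d h; simp at h
  | cons e es ih =>
    intro d h
    simp only [List.foldl_cons, stepA] at h ⊢
    cases hc : (PySem.Set.contains d e.1 && !PySem.Set.contains d e.2.1) with
    | true =>
      refine ⟨e.2.1, by simp, ?_, ?_⟩
      · have h2 := ((Bool.and_eq_true _ _).mp hc).2
        rw [Bool.not_eq_true'] at h2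
        exact h2
      · simp only [ite_true]
        exact foldA_mem_mono _ _ _ _ (mem_add_iff.mpr (Or.inr rfl))
    | false =>
      rw [hc] at h
      simp only [Bool.false_eq_true, ite_false] at h ⊢
      rcases ih d h with ⟨t, htl, htd, htf⟩
      exact ⟨t, by simp [htl], htd, htf⟩

theorem msr_lt (edges : List (String × String × Int)) (d : List String)
    (h : (passA edges d).2 = true) : msr edges (passA edges d).1 < msr edges d := by
  rcases foldA_true edges d (by simpa [passA] using h) with ⟨t, htl, htd, htf⟩
  refine countP_strict ?_ ⟨t, htl, ?_, ?_⟩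
  · intro x hx hq
    cases hdx : PySem.Set.contains d x with
    | false => rfl
    | true =>
      exfalso
      have hm := foldA_mem_mono edges d false x (mem_contains.mp hdx)
      have : PySem.Set.contains (passA edges d).1 x = true := by
        simpa [passA] using mem_contains.mpr hm
      rw [this] at hq
      simp at hq
  · show (!PySem.Set.contains d t) = true
    rw [htd]; rfl
  · show (!PySem.Set.contains (passA edges d).1 t) = false
    simp only [passA]
    rw [mem_contains.mpr htf]; rfl

-- the result of A's saturation loop: sound, extends d, Nodup, and edge-closed
theorem loopA_char (src : List String) (edges : List (String × String × Int)) :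
    ∀ (fuel : Nat) (d : List String), msr edges d < fuel → d.Nodup →
      (∀ x ∈ d, Reach src edges x) →
      (∀ x ∈ loopA edges fuel d, Reach src edges x) ∧
      (∀ x ∈ d, x ∈ loopA edges fuel d) ∧
      (loopA edges fuel d).Nodup ∧
      (∀ e ∈ edges, e.1 ∈ loopA edges fuel d → e.2.1 ∈ loopA edges fuel d) := by
  intro fuel
  induction fuel with
  | zero => intro d h; omega
  | succ n ih =>
    intro d hfuel hnd hd
    simp only [loopA, passA]
    by_cases hch : (edges.foldl stepA (d, false)).2 = true
    · simp only [hch, if_true]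
      have hm : msr edges (edges.foldl stepA (d, false)).1 < n := by
        have := msr_lt edges d (by simpa [passA] using hch)
        simp only [passA] at this
        omega
      have hsound := foldA_sound src edges edges (fun e he => he) d false hd
      have hnd' := foldA_nodup edges d false hnd
      rcases ih _ hm hnd' hsound with ⟨s1, s2, s3, s4⟩
      exact ⟨s1, fun x hx => s2 x (foldA_mem_mono _ _ _ _ hx), s3, s4⟩
    · simp only [Bool.not_eq_true] at hch
      simp only [hch, Bool.false_eq_true, if_false]
      rcases foldA_unchanged edges d hch with ⟨heq, hclosed⟩
      rw [heq]
      exact ⟨hd, fun x hx => hx, hnd, fun e he h1 => hclosed e he h1⟩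

-- ---------- B side ----------

-- the out-neighbour list the adjacency dict stores under s
def targets (edges : List (String × String × Int)) (s : String) : List String :=
  (edges.filter (fun e => e.1 == s)).map (fun e => e.2.1)

theorem getD_buildAdj (edges : List (String × String × Int)) (s : String) :
    (buildAdj edges).getD s [] = targets edges s := by
  have h : buildAdj edges =
      (edges.map (fun e => (e.1, e.2.1))).foldl
        (fun d p => d.modify p.1 [] (· ++ [p.2])) PySem.Dict.empty := by
    rw [List.foldl_map]
    rfl
  rw [h, PySem.Dict.getD_foldl_modify_append]
  simp [targets, List.filter_map, List.map_map, Function.comp_def, PySem.Dict.getD_empty]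

theorem mem_targets_iff (edges : List (String × String × Int)) (s t : String) :
    t ∈ targets edges s ↔ ∃ w, (s, t, w) ∈ edges := by
  simp only [targets, List.mem_map, List.mem_filter, beq_iff_eq]
  constructor
  · rintro ⟨e, ⟨he, rfl⟩, rfl⟩
    exact ⟨e.2.2, by simpa using he⟩
  · rintro ⟨w, hw⟩
    exact ⟨(s, t, w), ⟨hw, rfl⟩, rfl⟩

-- invariants of the inner 'for v in adj.get(u, [])' fold
theorem foldV_mono (l : List String) (st : List String × List String) (x : String)
    (h : x ∈ st.1) : x ∈ (l.foldl stepV st).1 := by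
  induction l generalizing st with
  | nil => exact h
  | cons v l ih =>
    simp only [List.foldl_cons, stepV]
    split
    · exact ih _ h
    · exact ih _ (mem_add_iff.mpr (Or.inl h))

theorem foldV_covers (l : List String) (st : List String × List String) (x : String)
    (h : x ∈ l) : x ∈ (l.foldl stepV st).1 := by
  induction l generalizing st with
  | nil => simp at h
  | cons v l ih =>
    simp only [List.foldl_cons, stepV]
    rcases List.mem_cons.mp h with rfl | h
    · split
      · rename_i hc
        exact foldV_mono _ _ _ (mem_contains.mp hc)
      · exact foldV_mono _ _ _ (mem_add_iff.mpr (Or.inr rfl))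
    · split
      · exact ih _ h
      · exact ih _ h

theorem foldV_sound (l : List String) (st : List String × List String) (x : String)
    (h : x ∈ (l.foldl stepV st).1) : x ∈ st.1 ∨ x ∈ l := by
  induction l generalizing st with
  | nil => exact Or.inl h
  | cons v l ih =>
    simp only [List.foldl_cons, stepV] at h
    split at h
    · rcases ih _ h with h | h
      · exact Or.inl h
      · exact Or.inr (List.mem_cons_of_mem _ h)
    · rcases ih _ h with h | h
      · rcases mem_add_iff.mp h with h | rfl
        · exact Or.inl h
        · exact Or.inr (List.mem_cons_self)
      · exact Or.inr (List.mem_cons_of_mem _ h)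

theorem foldV_nf_mono (l : List String) (st : List String × List String) (x : String)
    (h : x ∈ st.2) : x ∈ (l.foldl stepV st).2 := by
  induction l generalizing st with
  | nil => exact h
  | cons v l ih =>
    simp only [List.foldl_cons, stepV]
    split
    · exact ih _ h
    · exact ih _ (List.mem_append_left _ h)

theorem foldV_nf_sound (l : List String) (st : List String × List String) (x : String)
    (h : x ∈ (l.foldl stepV st).2) :
    x ∈ st.2 ∨ (x ∈ (l.foldl stepV st).1 ∧ x ∉ st.1 ∧ x ∈ l) := by
  induction l generalizing st with
  | nil => exact Or.inl h
  | cons v l ih =>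
    simp only [List.foldl_cons, stepV] at h ⊢
    split at h
    · rename_i hc
      split
      · rcases ih _ h with h | ⟨h1, h2, h3⟩
        · exact Or.inl h
        · exact Or.inr ⟨h1, h2, List.mem_cons_of_mem _ h3⟩
      · simp_all
    · rename_i hc
      split
      · simp_all
      · rcases ih _ h with h | ⟨h1, h2, h3⟩
        · rcases List.mem_append.mp h with h | h
          · exact Or.inl h
          · have hxv : x = v := by simpa using h
            subst hxv
            refine Or.inr ⟨foldV_mono _ _ _ (mem_add_iff.mpr (Or.inr rfl)), ?_,
              List.mem_cons_self⟩
            intro hxs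
            exact absurd (mem_contains.mpr hxs) (by simp_all)
        · refine Or.inr ⟨h1, ?_, List.mem_cons_of_mem _ h3⟩
          intro hxs
          exact h2 (mem_add_iff.mpr (Or.inl hxs))

theorem foldV_seen_sub_nf (l : List String) (st : List String × List String) (x : String)
    (h : x ∈ (l.foldl stepV st).1) : x ∈ st.1 ∨ x ∈ (l.foldl stepV st).2 := by
  induction l generalizing st with
  | nil => exact Or.inl h
  | cons v l ih =>
    simp only [List.foldl_cons, stepV] at h ⊢
    split at h
    · rename_i hc
      rw [if_pos hc]
      exact ih _ h
    · rename_i hc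
      rw [if_neg hc]
      rcases ih _ h with h | h
      · rcases mem_add_iff.mp h with h | rfl
        · exact Or.inl h
        · exact Or.inr (foldV_nf_mono _ _ _ (List.mem_append_right _ (by simp)))
      · exact Or.inr h

theorem foldV_nodup (l : List String) (st : List String × List String)
    (h : st.1.Nodup) : (l.foldl stepV st).1.Nodup := by
  induction l generalizing st with
  | nil => exact h
  | cons v l ih =>
    simp only [List.foldl_cons, stepV]
    split
    · exact ih _ h
    · exact ih _ (PySem.Set.nodup_add _ _ h)

-- invariants of the whole round (fold of stepU over the frontier)
theorem roundB_mono (adj : PySem.Dict String (List String)) (fr : List String)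
    (st : List String × List String) (x : String) (h : x ∈ st.1) :
    x ∈ (fr.foldl (stepU adj) st).1 := by
  induction fr generalizing st with
  | nil => exact h
  | cons u fr ih => exact ih _ (foldV_mono _ _ _ h)

theorem roundB_nf_mono (adj : PySem.Dict String (List String)) (fr : List String)
    (st : List String × List String) (x : String) (h : x ∈ st.2) :
    x ∈ (fr.foldl (stepU adj) st).2 := by
  induction fr generalizing st with
  | nil => exact h
  | cons u fr ih => exact ih _ (foldV_nf_mono _ _ _ h)

theorem roundB_covers (edges : List (String × String × Int)) (fr : List String)
    (st : List String × List String) (u t : String) (hu : u ∈ fr)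
    (ht : t ∈ targets edges u) :
    t ∈ (fr.foldl (stepU (buildAdj edges)) st).1 := by
  induction fr generalizing st with
  | nil => simp at hu
  | cons v fr ih =>
    rw [List.foldl_cons]
    rcases List.mem_cons.mp hu with rfl | hu
    · refine roundB_mono _ fr _ _ ?_
      simp only [stepU, getD_buildAdj]
      exact foldV_covers _ _ _ ht
    · exact ih _ hu

theorem roundB_sound (edges : List (String × String × Int)) (fr : List String)
    (st : List String × List String) (x : String)
    (h : x ∈ (fr.foldl (stepU (buildAdj edges)) st).1) :
    x ∈ st.1 ∨ ∃ u ∈ fr, x ∈ targets edges u := by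
  induction fr generalizing st with
  | nil => exact Or.inl h
  | cons u fr ih =>
    rw [List.foldl_cons] at h
    rcases ih _ h with h | ⟨v, hv, hx⟩
    · simp only [stepU, getD_buildAdj] at h
      rcases foldV_sound _ _ _ h with h | h
      · exact Or.inl h
      · exact Or.inr ⟨u, List.mem_cons_self, h⟩
    · exact Or.inr ⟨v, List.mem_cons_of_mem _ hv, hx⟩

theorem roundB_seen_sub_nf (adj : PySem.Dict String (List String)) (fr : List String)
    (st : List String × List String) (x : String)
    (h : x ∈ (fr.foldl (stepU adj) st).1) : x ∈ st.1 ∨ x ∈ (fr.foldl (stepU adj) st).2 := by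
  induction fr generalizing st with
  | nil => exact Or.inl h
  | cons u fr ih =>
    rw [List.foldl_cons] at h ⊢
    rcases ih _ h with h | h
    · simp only [stepU] at h
      rcases foldV_seen_sub_nf _ _ _ h with h | h
      · exact Or.inl h
      · exact Or.inr (roundB_nf_mono _ fr _ _ h)
    · exact Or.inr h

theorem roundB_nf_new (adj : PySem.Dict String (List String)) (fr : List String)
    (st : List String × List String) (x : String)
    (h : x ∈ (fr.foldl (stepU adj) st).2) :
    x ∈ st.2 ∨ (x ∈ (fr.foldl (stepU adj) st).1 ∧ x ∉ st.1) := by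
  induction fr generalizing st with
  | nil => exact Or.inl h
  | cons u fr ih =>
    rw [List.foldl_cons] at h ⊢
    rcases ih _ h with h1 | ⟨h1, h2⟩
    · rcases foldV_nf_sound _ _ _ h1 with h3 | ⟨h3, h4, _⟩
      · exact Or.inl h3
      · exact Or.inr ⟨roundB_mono _ fr _ _ h3, h4⟩
    · exact Or.inr ⟨h1, fun hx => h2 (foldV_mono _ _ _ hx)⟩

theorem roundB_nf_targets (edges : List (String × String × Int)) (fr : List String)
    (st : List String × List String) (x : String)
    (h : x ∈ (fr.foldl (stepU (buildAdj edges)) st).2) :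
    x ∈ st.2 ∨ ∃ u ∈ fr, x ∈ targets edges u := by
  induction fr generalizing st with
  | nil => exact Or.inl h
  | cons u fr ih =>
    rw [List.foldl_cons] at h
    rcases ih _ h with h | ⟨v, hv, hx⟩
    · simp only [stepU, getD_buildAdj] at h
      rcases foldV_nf_sound _ _ _ h with h | ⟨_, _, h3⟩
      · exact Or.inl h
      · exact Or.inr ⟨u, List.mem_cons_self, h3⟩
    · exact Or.inr ⟨v, List.mem_cons_of_mem _ hv, hx⟩

theorem roundB_nodup (adj : PySem.Dict String (List String)) (fr : List String)
    (st : List String × List String) (h : st.1.Nodup) :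
    (fr.foldl (stepU adj) st).1.Nodup := by
  induction fr generalizing st with
  | nil => exact h
  | cons u fr ih => exact ih _ (foldV_nodup _ _ h)

-- the result of B's BFS loop: sound, extends seen, Nodup, and edge-closed
theorem loopB_char (src : List String) (edges : List (String × String × Int)) :
    ∀ (fuel : Nat) (seen frontier : List String), msr edges seen + 2 ≤ fuel →
      seen.Nodup → (∀ x ∈ seen, Reach src edges x) → (∀ u ∈ frontier, u ∈ seen) →
      (∀ e ∈ edges, e.1 ∈ seen → e.2.1 ∈ seen ∨ e.1 ∈ frontier) →
      (∀ x ∈ loopB (buildAdj edges) fuel seen frontier, Reach src edges x) ∧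
      (∀ x ∈ seen, x ∈ loopB (buildAdj edges) fuel seen frontier) ∧
      (loopB (buildAdj edges) fuel seen frontier).Nodup ∧
      (∀ e ∈ edges, e.1 ∈ loopB (buildAdj edges) fuel seen frontier →
        e.2.1 ∈ loopB (buildAdj edges) fuel seen frontier) := by
  intro fuel
  induction fuel with
  | zero => intro seen frontier h; omega
  | succ n ih =>
    intro seen frontier hfuel hnd hseen hfr hI
    match frontier with
    | [] =>
      simp only [loopB]
      refine ⟨hseen, fun x hx => hx, hnd, ?_⟩
      intro e he h1
      rcases hI e he h1 with h | h
      · exact h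
      · simp at h
    | u :: fr =>
      simp only [loopB, roundB]
      set r := List.foldl (stepU (buildAdj edges)) (seen, []) (u :: fr) with hr
      -- facts about the round's result
      have hmono : ∀ x ∈ seen, x ∈ r.1 := fun x hx => by
        rw [hr]; exact roundB_mono _ _ _ _ hx
      have hsound : ∀ x ∈ r.1, Reach src edges x := by
        intro x hx
        rw [hr] at hx
        rcases roundB_sound edges _ _ _ hx with h | ⟨v, hv, ht⟩
        · exact hseen x h
        · rcases (mem_targets_iff edges v x).mp ht with ⟨w, hw⟩
          exact Reach.step (hseen v (hfr v hv)) hw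
      have hnd' : r.1.Nodup := by rw [hr]; exact roundB_nodup _ _ _ hnd
      have hnfseen : ∀ x ∈ r.2, x ∈ r.1 := by
        intro x hx
        rw [hr] at hx ⊢
        rcases roundB_nf_new _ _ _ _ hx with h | ⟨h1, _⟩
        · simp at h
        · exact h1
      have hI' : ∀ e ∈ edges, e.1 ∈ r.1 → e.2.1 ∈ r.1 ∨ e.1 ∈ r.2 := by
        intro e he h1
        rw [hr] at h1 ⊢
        rcases roundB_seen_sub_nf _ _ _ _ h1 with h | h
        · rcases hI e he h with h2 | h2
          · exact Or.inl (roundB_mono _ _ _ _ h2)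
          · refine Or.inl (roundB_covers edges _ _ _ _ h2 ?_)
            exact (mem_targets_iff edges e.1 e.2.1).mpr ⟨e.2.2, by simpa using he⟩
        · exact Or.inr h
      match hnf : r.2 with
      | [] =>
        -- next frontier empty: one more step returns r.1
        obtain ⟨m, rfl⟩ : ∃ m, n = m + 1 := ⟨n - 1, by omega⟩
        simp only [loopB]
        refine ⟨hsound, hmono, hnd', ?_⟩
        intro e he h1
        rcases hI' e he h1 with h | h
        · exact h
        · rw [hnf] at h; simp at h
      | x :: nf =>
        -- the round added a fresh edge target: the measure drops
        have hdrop : msr edges r.1 < msr edges seen := by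
          have hxr : x ∈ r.2 := by rw [hnf]; simp
          have hx1 : x ∈ r.1 := hnfseen x hxr
          have hxnotseen : x ∉ seen := by
            rw [hr] at hxr
            rcases roundB_nf_new _ _ _ _ hxr with h | ⟨_, h2⟩
            · simp at h
            · exact h2
          have hxt : ∃ u' ∈ u :: fr, x ∈ targets edges u' := by
            rw [hr] at hxr
            rcases roundB_nf_targets edges _ _ _ hxr with h | h
            · simp at h
            · exact h
          rcases hxt with ⟨u', _, hu't⟩
          rcases (mem_targets_iff edges u' x).mp hu't with ⟨w, hw⟩
          refine countP_strict ?_ ⟨x, ?_, ?_, ?_⟩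
          · intro y _ hq
            cases hcy : PySem.Set.contains seen y with
            | false => rfl
            | true =>
              exfalso
              have : PySem.Set.contains r.1 y = true :=
                mem_contains.mpr (hmono y (mem_contains.mp hcy))
              rw [this] at hq
              simp at hq
          · exact List.mem_map.mpr ⟨(u', x, w), hw, rfl⟩
          · show (!PySem.Set.contains seen x) = true
            cases hcx : PySem.Set.contains seen x with
            | false => rfl
            | true => exact absurd (mem_contains.mp hcx) hxnotseen
          · show (!PySem.Set.contains r.1 x) = false
            rw [mem_contains.mpr hx1]; rfl
        have hfuel' : msr edges r.1 + 2 ≤ n := by omega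
        rw [← hnf]
        rcases ih r.1 r.2 hfuel' hnd' hsound hnfseen hI' with ⟨s1, s2, s3, s4⟩
        exact ⟨s1, fun y hy => s2 y (hmono y hy), s3, s4⟩

-- ---------- both compute the reachable set ----------

theorem reach_mem_closed (src : List String) (edges : List (String × String × Int))
    (R : List String) (hsrc : ∀ x ∈ src, x ∈ R)
    (hclosed : ∀ e ∈ edges, e.1 ∈ R → e.2.1 ∈ R) :
    ∀ x, Reach src edges x → x ∈ R := by
  intro x hx
  induction hx with
  | source h => exact hsrc _ h
  | step _ he ih => exact hclosed _ he ih

theorem A_set_char (src : List String) (edges : List (String × String × Int)) :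
    (∀ x, x ∈ loopA edges (edges.length + 1) (PySem.Set.ofList src) ↔ Reach src edges x) ∧
    (loopA edges (edges.length + 1) (PySem.Set.ofList src)).Nodup := by
  have h0 : ∀ x ∈ PySem.Set.ofList src, Reach src edges x := by
    intro x hx
    exact Reach.source ((PySem.Set.mem_ofList _ _).mp hx)
  have hfuel : msr edges (PySem.Set.ofList src) < edges.length + 1 :=
    Nat.lt_succ_of_le (msr_le edges _)
  rcases loopA_char src edges (edges.length + 1) _ hfuel (PySem.Set.nodup_ofList _) h0 with
    ⟨s1, s2, s3, s4⟩
  refine ⟨fun x => ⟨s1 x, ?_⟩, s3⟩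
  exact fun hx => reach_mem_closed src edges _
    (fun y hy => s2 y ((PySem.Set.mem_ofList _ _).mpr hy)) s4 x hx

theorem B_set_char (src : List String) (edges : List (String × String × Int)) :
    (∀ x, x ∈ loopB (buildAdj edges) (edges.length + 2) (PySem.Set.ofList src) src ↔
      Reach src edges x) ∧
    (loopB (buildAdj edges) (edges.length + 2) (PySem.Set.ofList src) src).Nodup := by
  have h0 : ∀ x ∈ PySem.Set.ofList src, Reach src edges x := by
    intro x hx
    exact Reach.source ((PySem.Set.mem_ofList _ _).mp hx)
  have hfuel : msr edges (PySem.Set.ofList src) + 2 ≤ edges.length + 2 := by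
    have := msr_le edges (PySem.Set.ofList src)
    omega
  have hfr : ∀ u ∈ src, u ∈ PySem.Set.ofList src := fun u hu => (PySem.Set.mem_ofList _ _).mpr hu
  have hI : ∀ e ∈ edges, e.1 ∈ PySem.Set.ofList src → e.2.1 ∈ PySem.Set.ofList src ∨ e.1 ∈ src :=
    fun e _ h1 => Or.inr ((PySem.Set.mem_ofList _ _).mp h1)
  rcases loopB_char src edges (edges.length + 2) _ src hfuel (PySem.Set.nodup_ofList _) h0
    hfr hI with ⟨s1, s2, s3, s4⟩
  refine ⟨fun x => ⟨s1 x, ?_⟩, s3⟩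
  exact fun hx => reach_mem_closed src edges _
    (fun y hy => s2 y ((PySem.Set.mem_ofList _ _).mpr hy)) s4 x hx

-- ===== VERDICT (by name: the statement is the Claim_ definition above) =====
theorem find_descendants_spec : Claim_equal_find_descendants := by
  intro src edges _
  unfold Spec_find_descendants find_descendants find_descendants_alt
  rcases A_set_char src edges with ⟨hAm, hAn⟩
  rcases B_set_char src edges with ⟨hBm, hBn⟩
  have hperm : (loopA edges (edges.length + 1) (PySem.Set.ofList src)).Perm
      (loopB (buildAdj edges) (edges.length + 2) (PySem.Set.ofList src) src) :=
    (List.perm_ext_iff_of_nodup hAn hBn).mpr (fun a => (hAm a).trans (hBm a).symm)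
  exact PySem.List.sorted_eq_sorted_of_perm _ _ _ Function.injective_id hperm
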